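-- pv_equiv track=rewrite | github.com/PrimeJedi/Cryptography | CRC.py | get_hash_function
-- ===== SOURCE A (Python) =====
-- def get_hash_function(number: int) -> str:
--     # Задаем полином для хэш-функции
--     polynomial = [False] * 7
--     polynomial[0] = True
--     polynomial[3] = True
--     polynomial[6] = True
--
--     # Преобразуем число в двоичное представление и записываем его в стек
--     binary_number = bin(number)[2:].zfill(8)
--     stack = [False] * 7
--     position = len(binary_number) - 1
--     for i in range(6, -1, -1):
--         stack[i] = binary_number[position] == "1"
--         position -= 1
--
--     # Применяем полином для получения хэш-функции
--     for i in range(len(stack) - len(polynomial) + 1):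
--         if stack[i]:
--             for j in range(len(polynomial)):
--                 stack[i + j] ^= polynomial[j]
--
--     # Преобразуем полученную хэш-функцию в строку и возвращаем ее
--     hash_function = "".join(str(int(bit)) for bit in stack[-3:])
--     return hash_function
-- ===== SOURCE B (Python) =====
-- def get_hash_function(number: int) -> str:
--     # The CRC is linear over GF(2): after one division step the output bits are
--     # (s4, s5, s0 xor s6) of the 7 input bits, so compute them directly, no loop.
--     s = bin(number)[2:].zfill(8)
--     b = [c == "1" for c in s[-7:]]
--     out = (b[4], b[5], b[0] != b[6])
--     return "".join("1" if x else "0" for x in out)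
-- ===== Notes on version B (the rewrite author's own statement) =====
-- stated objective: simpler
-- what changed: B drops the polynomial-division loop entirely: since the CRC step is linear over GF(2) and only one division step can fire, the three output bits are the closed form (s4, s5, s0 xor s6) of the seven input bits, computed directly from the padded binary string.
import Mathlib
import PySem

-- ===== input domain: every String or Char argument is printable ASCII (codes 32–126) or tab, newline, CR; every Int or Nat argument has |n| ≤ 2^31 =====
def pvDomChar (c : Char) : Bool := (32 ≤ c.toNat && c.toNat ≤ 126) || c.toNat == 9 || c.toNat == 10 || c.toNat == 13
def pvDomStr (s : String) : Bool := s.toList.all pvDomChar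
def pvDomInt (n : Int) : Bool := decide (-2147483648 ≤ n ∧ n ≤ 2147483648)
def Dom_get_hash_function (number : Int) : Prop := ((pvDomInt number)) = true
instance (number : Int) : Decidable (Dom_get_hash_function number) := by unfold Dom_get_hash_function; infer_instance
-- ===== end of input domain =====

-- B replaces A's polynomial-division loop by the closed-form output bits (s4, s5, s0 xor s6) of the CRC step (objective: simpler).

-- ===== PORT A =====
def get_hash_function (number : Int) : String :=
  -- polynomial = [False]*7; polynomial[0]=True; polynomial[3]=True; polynomial[6]=True
  let polynomial := (((List.replicate 7 false).set 0 true).set 3 true).set 6 true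
  -- binary_number = bin(number)[2:].zfill(8)
  let binary_number : List Char :=
    PySem.Chars.zfill (PySem.List.slice (PySem.Int.pyBin number).toList (some 2) none) 8
  -- for i in range(6,-1,-1): stack[i] = binary_number[position] == "1"; position -= 1
  -- (pyGet? … .getD ' ' is a totality guard: position is always in range here)
  let st :=
    (PySem.List.pyRange 6 (-1) (-1)).foldl
      (fun (sp : List Bool × Int) i =>
        (PySem.List.pySetD sp.1 i (((PySem.List.pyGet? binary_number sp.2).getD ' ') == '1'),
         sp.2 - 1))
      (List.replicate 7 false, (binary_number.length : Int) - 1)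
  let stack := st.1
  -- for i in range(len(stack)-len(polynomial)+1): if stack[i]: for j in range(len(polynomial)): stack[i+j] ^= polynomial[j]
  let stack :=
    (PySem.List.pyRange 0 ((stack.length : Int) - (polynomial.length : Int) + 1) 1).foldl
      (fun st i =>
        if (PySem.List.pyGet? st i).getD false then
          (PySem.List.pyRange 0 (polynomial.length : Int) 1).foldl
            (fun st j =>
              PySem.List.pySetD st (i + j)
                (xor ((PySem.List.pyGet? st (i + j)).getD false)
                     ((PySem.List.pyGet? polynomial j).getD false)))
            st
        else st)
      stack
  -- "".join(str(int(bit)) for bit in stack[-3:])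
  String.ofList ((PySem.List.slice stack (some (-3)) none).map (fun b => if b then '1' else '0'))

-- ===== PORT B =====
def get_hash_function_alt (number : Int) : String :=
  -- s = bin(number)[2:].zfill(8)
  let s : List Char :=
    PySem.Chars.zfill (PySem.List.slice (PySem.Int.pyBin number).toList (some 2) none) 8
  -- b = [c == "1" for c in s[-7:]]
  let b : List Bool := (PySem.List.slice s (some (-7)) none).map (fun c => c == '1')
  -- out = (b[4], b[5], b[0] != b[6])   (pyGet? … .getD false is a totality guard: indices are always in range)
  let out : Bool × Bool × Bool :=
    ((PySem.List.pyGet? b 4).getD false,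
     (PySem.List.pyGet? b 5).getD false,
     ((PySem.List.pyGet? b 0).getD false) != ((PySem.List.pyGet? b 6).getD false))
  -- "".join("1" if x else "0" for x in out)
  String.ofList ([out.1, out.2.1, out.2.2].map (fun x => if x then '1' else '0'))

-- ===== PRECONDITION & SPEC =====
def Spec_get_hash_function (number : Int) (out : String) : Prop := out = get_hash_function_alt number
instance (number : Int) (out : String) : Decidable (Spec_get_hash_function number out) := by unfold Spec_get_hash_function; infer_instance

-- ===== CLAIM (what is proved, stated in full; the proofs are below) =====
def Claim_equal_get_hash_function : Prop := ∀ (number : Int), Dom_get_hash_function number → Spec_get_hash_function number (get_hash_function number)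

-- ===== LEMMAS AND PROOFS =====

-- proof-side helpers: the shared binary string and the two tails of the ports
def pvBinStr (number : Int) : List Char :=
  PySem.Chars.zfill (PySem.List.slice (PySem.Int.pyBin number).toList (some 2) none) 8

def pvTailA (s : List Char) : String :=
  String.ofList
    ((PySem.List.slice
        ((PySem.List.pyRange 0
            ((((PySem.List.pyRange 6 (-1) (-1)).foldl
                (fun (sp : List Bool × Int) i =>
                  (PySem.List.pySetD sp.1 i (((PySem.List.pyGet? s sp.2).getD ' ') == '1'),
                   sp.2 - 1))
                (List.replicate 7 false, (s.length : Int) - 1)).1.length : Int)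
              - (((((List.replicate 7 false).set 0 true).set 3 true).set 6 true).length : Int) + 1) 1).foldl
          (fun st i =>
            if (PySem.List.pyGet? st i).getD false then
              (PySem.List.pyRange 0 (((((List.replicate 7 false).set 0 true).set 3 true).set 6 true).length : Int) 1).foldl
                (fun st j =>
                  PySem.List.pySetD st (i + j)
                    (xor ((PySem.List.pyGet? st (i + j)).getD false)
                         ((PySem.List.pyGet? ((((List.replicate 7 false).set 0 true).set 3 true).set 6 true) j).getD false)))
                st
            else st)
          ((PySem.List.pyRange 6 (-1) (-1)).foldl
            (fun (sp : List Bool × Int) i =>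
              (PySem.List.pySetD sp.1 i (((PySem.List.pyGet? s sp.2).getD ' ') == '1'),
               sp.2 - 1))
            (List.replicate 7 false, (s.length : Int) - 1)).1)
        (some (-3)) none).map (fun b => if b then '1' else '0'))

def pvTailB (s : List Char) : String :=
  let b : List Bool := (PySem.List.slice s (some (-7)) none).map (fun c => c == '1')
  String.ofList
    ([((PySem.List.pyGet? b 4).getD false),
      ((PySem.List.pyGet? b 5).getD false),
      (((PySem.List.pyGet? b 0).getD false) != ((PySem.List.pyGet? b 6).getD false))].map
      (fun x => if x then '1' else '0'))

lemma pvA_eq (number : Int) : get_hash_function number = pvTailA (pvBinStr number) := rfl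
lemma pvB_eq (number : Int) : get_hash_function_alt number = pvTailB (pvBinStr number) := by
  simp only [get_hash_function_alt, pvTailB, pvBinStr]

lemma pvBinStr_len (number : Int) : 8 ≤ (pvBinStr number).length := by
  simp [pvBinStr, PySem.Chars.length_zfill]

-- the stack-building loop of A reads, MSB first, the last seven characters
lemma pv_build (s : List Char) :
  ((PySem.List.pyRange 6 (-1) (-1)).foldl
      (fun (sp : List Bool × Int) i =>
        (PySem.List.pySetD sp.1 i (((PySem.List.pyGet? s sp.2).getD ' ') == '1'),
         sp.2 - 1))
      (List.replicate 7 false, (s.length : Int) - 1)).1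
  = [((PySem.List.pyGet? s ((s.length:Int)-1-1-1-1-1-1-1)).getD ' ') == '1',
     ((PySem.List.pyGet? s ((s.length:Int)-1-1-1-1-1-1)).getD ' ') == '1',
     ((PySem.List.pyGet? s ((s.length:Int)-1-1-1-1-1)).getD ' ') == '1',
     ((PySem.List.pyGet? s ((s.length:Int)-1-1-1-1)).getD ' ') == '1',
     ((PySem.List.pyGet? s ((s.length:Int)-1-1-1)).getD ' ') == '1',
     ((PySem.List.pyGet? s ((s.length:Int)-1-1)).getD ' ') == '1',
     ((PySem.List.pyGet? s ((s.length:Int)-1)).getD ' ') == '1'] := by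
  rw [show PySem.List.pyRange 6 (-1) (-1) = [6,5,4,3,2,1,0] from by decide]
  simp only [List.foldl_cons, List.foldl_nil]
  norm_num [PySem.List.pySetD_of_nonneg, List.set, List.replicate,
    show Int.toNat 6 = 6 from rfl, show Int.toNat 5 = 5 from rfl, show Int.toNat 4 = 4 from rfl,
    show Int.toNat 3 = 3 from rfl, show Int.toNat 2 = 2 from rfl]

lemma pv_getApp (u v : List Char) (i : Int) (k : Nat) (x : Char) (hx : v[k]? = some x)
    (hi : i = (u.length : Int) + k) :
    (PySem.List.pyGet? (u ++ v) i).getD ' ' = x := by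
  subst hi
  rw [PySem.List.pyGet?_append_right, hx]
  rfl

lemma pv_key7 (u : List Char) (c0 c1 c2 c3 c4 c5 c6 : Char) :
    pvTailA (u ++ [c0,c1,c2,c3,c4,c5,c6]) = pvTailB (u ++ [c0,c1,c2,c3,c4,c5,c6]) := by
  unfold pvTailA pvTailB
  rw [pv_build]
  rw [pv_getApp u _ _ 0 c0 rfl (by simp; omega),
      pv_getApp u _ _ 1 c1 rfl (by simp; omega),
      pv_getApp u _ _ 2 c2 rfl (by simp; omega),
      pv_getApp u _ _ 3 c3 rfl (by simp; omega),
      pv_getApp u _ _ 4 c4 rfl (by simp; omega),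
      pv_getApp u _ _ 5 c5 rfl (by simp; omega),
      pv_getApp u _ _ 6 c6 rfl (by simp; omega)]
  rw [PySem.List.slice_from_neg_ofNat _ 7 (by norm_num),
      show (u ++ [c0,c1,c2,c3,c4,c5,c6]).length - 7 = u.length from by simp,
      List.drop_left]
  simp only [List.map_cons, List.map_nil, PySem.List.pyGet?]
  generalize (c0 == '1') = b0
  generalize (c1 == '1') = b1
  generalize (c2 == '1') = b2
  generalize (c3 == '1') = b3
  generalize (c4 == '1') = b4
  generalize (c5 == '1') = b5
  generalize (c6 == '1') = b6
  cases b0 <;> cases b1 <;> cases b2 <;> cases b3 <;> cases b4 <;> cases b5 <;> cases b6 <;> decide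

lemma pv_key (s : List Char) (h : 8 ≤ s.length) : pvTailA s = pvTailB s := by
  have h7 : (s.drop (s.length - 7)).length = 7 := by simp; omega
  obtain ⟨c0, t0, e0⟩ := List.exists_of_length_succ _ h7
  have l0 : t0.length = 6 := by have := congrArg List.length e0; rw [h7] at this; simpa using this.symm
  obtain ⟨c1, t1, e1⟩ := List.exists_of_length_succ _ l0
  have l1 : t1.length = 5 := by have := congrArg List.length e1; rw [l0] at this; simpa using this.symm
  obtain ⟨c2, t2, e2⟩ := List.exists_of_length_succ _ l1
  have l2 : t2.length = 4 := by have := congrArg List.length e2; rw [l1] at this; simpa using this.symm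
  obtain ⟨c3, t3, e3⟩ := List.exists_of_length_succ _ l2
  have l3 : t3.length = 3 := by have := congrArg List.length e3; rw [l2] at this; simpa using this.symm
  obtain ⟨c4, t4, e4⟩ := List.exists_of_length_succ _ l3
  have l4 : t4.length = 2 := by have := congrArg List.length e4; rw [l3] at this; simpa using this.symm
  obtain ⟨c5, t5, e5⟩ := List.exists_of_length_succ _ l4
  have l5 : t5.length = 1 := by have := congrArg List.length e5; rw [l4] at this; simpa using this.symm
  obtain ⟨c6, t6, e6⟩ := List.exists_of_length_succ _ l5
  have l6 : t6 = [] := by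
    have := congrArg List.length e6; rw [l5] at this
    exact List.eq_nil_of_length_eq_zero (by simpa using this.symm)
  have hs : s = s.take (s.length - 7) ++ [c0, c1, c2, c3, c4, c5, c6] := by
    conv_lhs => rw [← List.take_append_drop (s.length - 7) s]
    rw [e0, e1, e2, e3, e4, e5, e6, l6]
  rw [hs]
  exact pv_key7 _ c0 c1 c2 c3 c4 c5 c6

-- ===== VERDICT (by name: the statement is the Claim_ definition above) =====
theorem get_hash_function_spec : Claim_equal_get_hash_function := by
  intro number _
  unfold Spec_get_hash_function
  rw [pvA_eq, pvB_eq]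
  exact pv_key _ (pvBinStr_len number)
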